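-- pv_equiv track=rewrite | github.com/apache/brpc | message_code_generate.py | isinit_generate
-- ===== SOURCE A (Python) =====
-- def isinit_generate(fields):
--   result = ""
--   for field in fields:
--     message_field_type = field[0]
--     field_name = field[2]
--     if message_field_type == "required":
--       if len(result) == 0:
--         result += "return has_{0}()".format(field_name)
--       else:
--         result += "  && has_{0}()".format(field_name)
--   if len(result) == 0:
--     result = "return true;"
--   else:
--     result += ";"
--   return result
-- ===== SOURCE B (Python) =====
-- def _suffix(fs):
--     # "  && has_x()" pieces for the required fields in fs, built back-to-front
--     if not fs:
--         return ""
--     tag, name = fs[0][0], fs[0][2]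
--     tail = _suffix(fs[1:])
--     if tag == "required":
--         return "  && has_{0}()".format(name) + tail
--     return tail
--
-- def isinit_generate(fields):
--     # recurse to the first required field; early-return the whole condition from there
--     if not fields:
--         return "return true;"
--     tag, name = fields[0][0], fields[0][2]
--     if tag == "required":
--         return "return has_{0}()".format(name) + _suffix(fields[1:]) + ";"
--     return isinit_generate(fields[1:])
-- ===== Notes on version B (the rewrite author's own statement) =====
-- stated objective: alternative
-- what changed: Replaces A's single accumulating loop with a first-element emptiness flag by structural recursion: recurse to the first required field, early-return its 'return has_x()' head there, and build the ' && has_x()' suffix of the remaining fields back-to-front by a second recursion (no accumulator, no emptiness flag).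
import Mathlib
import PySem

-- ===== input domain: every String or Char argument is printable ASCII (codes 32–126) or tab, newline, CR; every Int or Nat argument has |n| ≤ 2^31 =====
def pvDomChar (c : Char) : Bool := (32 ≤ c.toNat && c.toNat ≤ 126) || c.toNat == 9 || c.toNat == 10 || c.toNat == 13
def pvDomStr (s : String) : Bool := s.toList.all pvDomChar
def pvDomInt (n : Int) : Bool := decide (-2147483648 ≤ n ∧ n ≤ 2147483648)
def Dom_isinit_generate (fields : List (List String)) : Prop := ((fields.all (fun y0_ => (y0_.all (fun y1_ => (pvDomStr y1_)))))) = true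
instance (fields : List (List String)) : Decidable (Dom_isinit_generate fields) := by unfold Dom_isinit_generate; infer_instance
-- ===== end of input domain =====

-- B replaces A's accumulating loop with its first-element flag by structural recursion: recurse to the
-- first required field, early-return the head piece there, and build the suffix back-to-front (alternative; same cost class).
-- Strings are built on the List Char side (PySem convention); field[0]/field[2] are ported with pyGetD —
-- the raising inputs (some field with fewer than 3 elements) are excluded by Pre_.

-- ===== PORT A =====
def isinitLoopA (fields : List (List String)) (result : List Char) : List Char :=
  match fields with
  | [] => result
  | field :: rest =>
      let t := PySem.List.pyGetD field 0 ""
      let n := PySem.List.pyGetD field 2 ""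
      isinitLoopA rest
        (if t == "required" then
          (if result.length == 0 then result ++ ("return has_".toList ++ n.toList ++ "()".toList)
           else result ++ ("  && has_".toList ++ n.toList ++ "()".toList))
         else result)

def isinit_generate (fields : List (List String)) : String :=
  let result := isinitLoopA fields []
  if result.length == 0 then "return true;" else String.ofList (result ++ ";".toList)

-- ===== PORT B =====
-- _suffix: "  && has_x()" pieces for the required fields, built back-to-front
def isinitSuffixB (fs : List (List String)) : List Char :=
  match fs with
  | [] => []
  | f :: rest =>
      let tag := PySem.List.pyGetD f 0 ""
      let name := PySem.List.pyGetD f 2 ""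
      let tail := isinitSuffixB rest
      if tag == "required" then
        "  && has_".toList ++ name.toList ++ "()".toList ++ tail
      else tail

-- recurse to the first required field; early-return the whole condition from there
def isinit_generate_alt (fields : List (List String)) : String :=
  match fields with
  | [] => "return true;"
  | f :: rest =>
      let tag := PySem.List.pyGetD f 0 ""
      let name := PySem.List.pyGetD f 2 ""
      if tag == "required" then
        String.ofList ("return has_".toList ++ name.toList ++ "()".toList ++
          isinitSuffixB rest ++ ";".toList)
      else isinit_generate_alt rest

-- ===== PRECONDITION & SPEC =====
-- Pre_ excludes exactly the inputs where Python A raises IndexError: A reads field[0] and field[2]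
-- for EVERY field, so every field must have at least 3 elements.
def Pre_isinit_generate (fields : List (List String)) : Prop :=
  ∀ f ∈ fields, 3 ≤ f.length
instance (fields : List (List String)) : Decidable (Pre_isinit_generate fields) := by
  unfold Pre_isinit_generate; infer_instance

def pvWitness_isinit_generate : List (List String) :=
  [["required", "string", "name"], ["optional", "int32", "id"]]

def Spec_isinit_generate (fields : List (List String)) (out : String) : Prop := out = isinit_generate_alt fields
instance (fields : List (List String)) (out : String) : Decidable (Spec_isinit_generate fields out) := by unfold Spec_isinit_generate; infer_instance

-- ===== CLAIM (what is proved, stated in full; the proofs are below) =====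
def Claim_equal_isinit_generate : Prop := ∀ (fields : List (List String)), Dom_isinit_generate fields → Pre_isinit_generate fields → Spec_isinit_generate fields (isinit_generate fields)

-- ===== LEMMAS AND PROOFS =====

-- the required names both ports condition on
def reqNames (fields : List (List String)) : List String :=
  (fields.filter (fun f => PySem.List.pyGetD f 0 "" == "required")).map
    (fun f => PySem.List.pyGetD f 2 "")

def hasPiece (n : String) : List Char := "has_".toList ++ n.toList ++ "()".toList

lemma loopA_ne (fields : List (List String)) (r : List Char) (hr : r ≠ []) :
    isinitLoopA fields r =
      r ++ (reqNames fields).flatMap (fun n => "  && ".toList ++ hasPiece n) := by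
  induction fields generalizing r with
  | nil => simp [isinitLoopA, reqNames]
  | cons f rest ih =>
      simp only [isinitLoopA, reqNames, List.filter_cons]
      by_cases hreq : (PySem.List.pyGetD f 0 "" == "required") = true
      · have hlen : (r.length == 0) = false := by
          simp [List.length_eq_zero_iff, hr]
        rw [if_pos hreq, hlen, if_pos hreq]
        simp only [Bool.false_eq_true, if_false]
        rw [ih _ (by simp [hr])]
        simp [reqNames, hasPiece]
      · rw [if_neg hreq, if_neg hreq]
        rw [ih r hr]
        simp [reqNames]

lemma loopA_nil (fields : List (List String)) :
    isinitLoopA fields [] =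
      match reqNames fields with
      | [] => []
      | n :: ns => "return ".toList ++ hasPiece n ++
          ns.flatMap (fun m => "  && ".toList ++ hasPiece m) := by
  induction fields with
  | nil => simp [isinitLoopA, reqNames]
  | cons f rest ih =>
      simp only [isinitLoopA, reqNames, List.filter_cons]
      by_cases hreq : (PySem.List.pyGetD f 0 "" == "required") = true
      · rw [if_pos hreq, if_pos hreq]
        simp only [List.length_nil, beq_self_eq_true, if_true, List.nil_append]
        rw [loopA_ne _ _ (by simp)]
        simp [reqNames, hasPiece]
      · rw [if_neg hreq, if_neg hreq]
        rw [ih]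
        simp [reqNames]

lemma suffixB_eq (fs : List (List String)) :
    isinitSuffixB fs = (reqNames fs).flatMap (fun n => "  && ".toList ++ hasPiece n) := by
  induction fs with
  | nil => simp [isinitSuffixB, reqNames]
  | cons f rest ih =>
      simp only [isinitSuffixB, reqNames, List.filter_cons]
      by_cases hreq : (PySem.List.pyGetD f 0 "" == "required") = true
      · rw [if_pos hreq, if_pos hreq, ih]
        simp [reqNames, hasPiece]
      · rw [if_neg hreq, if_neg hreq, ih]
        simp [reqNames]

lemma altB_eq (fields : List (List String)) :
    isinit_generate_alt fields =
      match reqNames fields with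
      | [] => "return true;"
      | n :: ns => String.ofList ("return ".toList ++ hasPiece n ++
          ns.flatMap (fun m => "  && ".toList ++ hasPiece m) ++ ";".toList) := by
  induction fields with
  | nil => simp [isinit_generate_alt, reqNames]
  | cons f rest ih =>
      simp only [isinit_generate_alt, reqNames, List.filter_cons]
      by_cases hreq : (PySem.List.pyGetD f 0 "" == "required") = true
      · rw [if_pos hreq, if_pos hreq, suffixB_eq]
        simp [reqNames, hasPiece]
      · rw [if_neg hreq, if_neg hreq, ih]
        simp [reqNames]

-- ===== VERDICT (by name: the statement is the Claim_ definition above) =====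
theorem isinit_generate_spec : Claim_equal_isinit_generate := by
  intro fields _ _
  show isinit_generate fields = isinit_generate_alt fields
  unfold isinit_generate
  rw [loopA_nil fields, altB_eq fields]
  cases hN : reqNames fields with
  | nil => simp
  | cons n ns =>
      dsimp only
      have hlen : ((("return ".toList ++ hasPiece n ++
          ns.flatMap (fun m => "  && ".toList ++ hasPiece m)).length == 0) = false) := by
        simp [hasPiece]
      rw [hlen]
      simp
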